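-- pv_equiv track=rewrite | github.com/hsgtin24-cyber/kho-bai-tap | problems/3/generator.py | solve
-- ===== SOURCE A (Python) =====
-- def solve(s):
--     n = len(s)
--     ans = 0
--     upper = []
--     lower = []
--     digit = []
--
--     # Tiền xử lý vị trí các loại ký tự
--     for i, char in enumerate(s):
--         if 'A' <= char <= 'Z': upper.append(i)
--         elif 'a' <= char <= 'z': lower.append(i)
--         elif '0' <= char <= '9': digit.append(i)
--
--     u_idx = l_idx = d_idx = 0
--     num_u, num_l, num_d = len(upper), len(lower), len(digit)
--
--     for i in range(n):
--         # Tìm vị trí xuất hiện đầu tiên của mỗi loại ký tự kể từ i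
--         while u_idx < num_u and upper[u_idx] < i: u_idx += 1
--         while l_idx < num_l and lower[l_idx] < i: l_idx += 1
--         while d_idx < num_d and digit[d_idx] < i: d_idx += 1
--
--         if u_idx < num_u and l_idx < num_l and d_idx < num_d:
--             # Vị trí j gần nhất thỏa mãn 3 loại ký tự
--             j_min_types = max(upper[u_idx], lower[l_idx], digit[d_idx])
--             # Vị trí j gần nhất thỏa mãn độ dài >= 6
--             j_min_len = i + 5
--
--             start_j = max(j_min_types, j_min_len)
--             if start_j < n:
--                 ans += (n - start_j)
--
--     return ans
-- ===== SOURCE B (Python) =====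
-- def solve(s):
--     n = len(s)
--     ans = 0
--     nu = nl = nd = None
--     for i in range(n - 1, -1, -1):
--         c = s[i]
--         if 'A' <= c <= 'Z': nu = i
--         elif 'a' <= c <= 'z': nl = i
--         elif '0' <= c <= '9': nd = i
--         if nu is not None and nl is not None and nd is not None:
--             start_j = max(nu, nl, nd, i + 5)
--             if start_j < n:
--                 ans += n - start_j
--     return ans
-- ===== Notes on version B (the rewrite author's own statement) =====
-- stated objective: simpler
-- what changed: Replaced the three precomputed upper/lower/digit index arrays and the forward loop with three monotone pointers by a single backward scan that keeps three scalars holding the nearest index of each character class at or after i, adding max(nu, nl, nd, i+5)'s tail count at each i.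
import Mathlib
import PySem

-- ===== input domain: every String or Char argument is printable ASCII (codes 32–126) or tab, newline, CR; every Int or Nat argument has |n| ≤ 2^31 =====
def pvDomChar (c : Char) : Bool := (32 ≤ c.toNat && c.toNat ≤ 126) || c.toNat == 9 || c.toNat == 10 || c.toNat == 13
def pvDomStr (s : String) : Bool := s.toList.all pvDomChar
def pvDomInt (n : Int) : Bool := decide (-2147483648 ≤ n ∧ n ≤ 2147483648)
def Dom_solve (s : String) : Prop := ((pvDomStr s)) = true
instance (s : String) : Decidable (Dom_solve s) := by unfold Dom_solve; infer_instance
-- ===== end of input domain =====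

-- B replaces A's three precomputed index lists and forward two-pointer scans by a single
-- backward pass keeping three "next occurrence" scalars (objective: simpler).


-- ===== PORT A =====
def solveCU (c : Char) : Bool := decide ('A' ≤ c ∧ c ≤ 'Z')
def solveCL (c : Char) : Bool := decide ('a' ≤ c ∧ c ≤ 'z')
def solveCD (c : Char) : Bool := decide ('0' ≤ c ∧ c ≤ '9')

-- A: "for i, char in enumerate(s)" classifying each index into upper/lower/digit
def solvePrep : List Char → Nat → List Nat × List Nat × List Nat
  | [], _ => ([], [], [])
  | c :: cs, i =>
    let r := solvePrep cs (i + 1)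
    if solveCU c then (i :: r.1, r.2.1, r.2.2)
    else if solveCL c then (r.1, i :: r.2.1, r.2.2)
    else if solveCD c then (r.1, r.2.1, i :: r.2.2)
    else r

-- A: "while idx < num and arr[idx] < i: idx += 1"
def solveAdv (arr : List Nat) (u i : Nat) : Nat :=
  if h : u < arr.length ∧ arr.getD u 0 < i then solveAdv arr (u + 1) i else u
  termination_by arr.length - u
  decreasing_by omega

-- A: the outer "for i in range(n)" loop over state (u_idx, l_idx, d_idx, ans)
def solveLoop (upper lower digit : List Nat) (n : Nat) :
    List Nat → Nat × Nat × Nat × Int → Nat × Nat × Nat × Int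
  | [], st => st
  | i :: is, (u, lo, d, ans) =>
    let u := solveAdv upper u i
    let lo := solveAdv lower lo i
    let d := solveAdv digit d i
    let ans :=
      if u < upper.length ∧ lo < lower.length ∧ d < digit.length then
        let jt := max (upper.getD u 0) (max (lower.getD lo 0) (digit.getD d 0))
        let sj := max jt (i + 5)
        if sj < n then ans + ((n : Int) - (sj : Int)) else ans
      else ans
    solveLoop upper lower digit n is (u, lo, d, ans)

def solve (s : String) : Int :=
  let l := s.toList
  let n := l.length
  let r := solvePrep l 0
  (solveLoop r.1 r.2.1 r.2.2 n (List.range n) (0, 0, 0, 0)).2.2.2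

-- ===== PORT B =====
-- B: backward scan "for i in range(n-1, -1, -1)"; the tail is processed first,
-- yielding the three next-occurrence scalars and the running answer for i+1.
def solveAltGo (n : Nat) : List Char → Nat → Option Nat × Option Nat × Option Nat × Int
  | [], _ => (none, none, none, 0)
  | c :: cs, i =>
    let r := solveAltGo n cs (i + 1)
    let nu := if solveCU c then some i else r.1
    let nl := if ¬ solveCU c ∧ solveCL c then some i else r.2.1
    let nd := if ¬ solveCU c ∧ ¬ solveCL c ∧ solveCD c then some i else r.2.2.1
    let ans :=
      match nu, nl, nd with
      | some a, some b, some d =>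
        let sj := max (max (max a b) d) (i + 5)
        if sj < n then r.2.2.2 + ((n : Int) - (sj : Int)) else r.2.2.2
      | _, _, _ => r.2.2.2
    (nu, nl, nd, ans)

def solve_alt (s : String) : Int :=
  let l := s.toList
  (solveAltGo l.length l 0).2.2.2

-- ===== PRECONDITION & SPEC =====
def Spec_solve (s : String) (out : Int) : Prop := out = solve_alt s
instance (s : String) (out : Int) : Decidable (Spec_solve s out) := by unfold Spec_solve; infer_instance

-- ===== CLAIM (what is proved, stated in full; the proofs are below) =====
def Claim_equal_solve : Prop := ∀ (s : String), Dom_solve s → Spec_solve s (solve s)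

-- ===== LEMMAS AND PROOFS =====

-- indices (counted from i) of chars of cs satisfying p
def pvF (p : Char → Bool) : List Char → Nat → List Nat
  | [], _ => []
  | c :: cs, i => if p c then i :: pvF p cs (i + 1) else pvF p cs (i + 1)

-- first such index, as an option
def pvN (p : Char → Bool) : List Char → Nat → Option Nat
  | [], _ => none
  | c :: cs, i => if p c then some i else pvN p cs (i + 1)

def pvContrib (n i : Nat) : Option Nat → Option Nat → Option Nat → Int
  | some a, some b, some c =>
    let sj := max (max (max a b) c) (i + 5)
    if sj < n then (n : Int) - (sj : Int) else 0
  | _, _, _ => 0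

def pvS (n : Nat) : List Char → Nat → Int
  | [], _ => 0
  | c :: cs, i =>
    pvS n cs (i + 1) +
      pvContrib n i (pvN solveCU (c :: cs) i) (pvN solveCL (c :: cs) i) (pvN solveCD (c :: cs) i)

lemma cu_disj_cl (c : Char) : solveCU c = true → solveCL c = false := by
  simp [solveCU, solveCL, Char.le_def, UInt32.le_iff_toNat_le]
  intro h1 h2 h3
  omega
lemma cu_disj_cd (c : Char) : solveCU c = true → solveCD c = false := by
  simp [solveCU, solveCD, Char.le_def, UInt32.le_iff_toNat_le]
  intro h1 h2 h3
  omega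
lemma cl_disj_cd (c : Char) : solveCL c = true → solveCD c = false := by
  simp [solveCL, solveCD, Char.le_def, UInt32.le_iff_toNat_le]
  intro h1 h2 h3
  omega

lemma solvePrep_eq (cs : List Char) (i : Nat) :
    solvePrep cs i = (pvF solveCU cs i, pvF solveCL cs i, pvF solveCD cs i) := by
  induction cs generalizing i with
  | nil => simp [solvePrep, pvF]
  | cons c cs ih =>
    simp only [solvePrep, ih, pvF]
    by_cases hu : solveCU c = true
    · simp [hu, cu_disj_cl c hu, cu_disj_cd c hu]
    · by_cases hl : solveCL c = true
      · simp [hu, hl, cl_disj_cd c hl]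
      · by_cases hd : solveCD c = true
        · simp [hu, hl, hd]
        · simp [hu, hl, hd]

lemma pvN_eq_head (p : Char → Bool) (cs : List Char) (i : Nat) :
    pvN p cs i = (pvF p cs i).head? := by
  induction cs generalizing i with
  | nil => simp [pvN, pvF]
  | cons c cs ih =>
    simp only [pvN, pvF]
    by_cases h : p c = true
    · simp [h]
    · simp [h, ih]

lemma pvF_append (p : Char → Bool) (cs ds : List Char) (i : Nat) :
    pvF p (cs ++ ds) i = pvF p cs i ++ pvF p ds (i + cs.length) := by
  induction cs generalizing i with
  | nil => simp [pvF]
  | cons c cs ih =>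
    have harith : i + (c :: cs).length = (i + 1) + cs.length := by simp; omega
    simp only [List.cons_append, pvF, ih, harith]
    split <;> simp

lemma pvF_mem_bounds (p : Char → Bool) (cs : List Char) (i x : Nat) (h : x ∈ pvF p cs i) :
    i ≤ x ∧ x < i + cs.length := by
  induction cs generalizing i with
  | nil => simp [pvF] at h
  | cons c cs ih =>
    simp only [pvF] at h
    have hlen : (c :: cs).length = cs.length + 1 := by simp
    split at h
    · rcases List.mem_cons.mp h with rfl | h'
      · simp
      · have := ih (i + 1) h'
        omega
    · have := ih (i + 1) h
      omega

lemma solveAdv_eq (P Q : List Nat) (i u : Nat)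
    (hP : ∀ x ∈ P, x < i) (hQ : ∀ x ∈ Q, i ≤ x) (hu : u ≤ P.length) :
    solveAdv (P ++ Q) u i = P.length := by
  induction' hk : P.length - u with k ih generalizing u
  · -- u = P.length
    have hu' : u = P.length := by omega
    subst hu'
    rw [solveAdv, dif_neg]
    rintro ⟨h1, h2⟩
    have hQ' : Q ≠ [] := by
      intro h; subst h; simp at h1
    have : (P ++ Q).getD P.length 0 = Q.getD 0 0 := by
      rw [List.getD_append_right _ _ _ _ (le_refl _)]
      simp
    rw [this] at h2
    have hmem : Q.getD 0 0 ∈ Q := by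
      have h0 : 0 < Q.length := List.length_pos_iff.mpr hQ'
      rw [List.getD_eq_getElem _ _ h0]
      exact List.getElem_mem h0
    exact absurd h2 (by have := hQ _ hmem; omega)
  · have hu' : u < P.length := by omega
    rw [solveAdv, dif_pos]
    · exact ih (u + 1) (by omega) (by omega)
    · refine ⟨by simp; omega, ?_⟩
      have : (P ++ Q).getD u 0 = P.getD u 0 := List.getD_append _ _ _ _ hu'
      rw [this]
      have hmem : P.getD u 0 ∈ P := by
        rw [List.getD_eq_getElem _ _ hu']
        exact List.getElem_mem hu'
      exact hP _ hmem

lemma matchAns (n i : Nat) (a b c : Option Nat) (t : Int) :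
    (match a, b, c with
      | some a, some b, some d =>
        let sj := max (max (max a b) d) (i + 5)
        if sj < n then t + ((n : Int) - (sj : Int)) else t
      | _, _, _ => t) = t + pvContrib n i a b c := by
  rcases a <;> rcases b <;> rcases c <;> simp [pvContrib] <;> split <;> ring

lemma solveAltGo_eq (n : Nat) (cs : List Char) (i : Nat) :
    solveAltGo n cs i = (pvN solveCU cs i, pvN solveCL cs i, pvN solveCD cs i, pvS n cs i) := by
  induction cs generalizing i with
  | nil => simp [solveAltGo, pvN, pvS]
  | cons c cs ih =>
    have hnl : (if ¬ solveCU c ∧ solveCL c then some i else pvN solveCL cs (i + 1))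
        = pvN solveCL (c :: cs) i := by
      by_cases hl : solveCL c = true
      · have hu : solveCU c = false := by
          by_cases hu : solveCU c = true
          · exact absurd (cu_disj_cl c hu) (by simp [hl])
          · simpa using hu
        simp [pvN, hl, hu]
      · simp [pvN, hl]
    have hnd : (if ¬ solveCU c ∧ ¬ solveCL c ∧ solveCD c then some i else pvN solveCD cs (i + 1))
        = pvN solveCD (c :: cs) i := by
      by_cases hd : solveCD c = true
      · have hu : solveCU c = false := by
          by_cases hu : solveCU c = true
          · exact absurd (cu_disj_cd c hu) (by simp [hd])
          · simpa using hu
        have hl : solveCL c = false := by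
          by_cases hl : solveCL c = true
          · exact absurd (cl_disj_cd c hl) (by simp [hd])
          · simpa using hl
        simp [pvN, hd, hu, hl]
      · simp [pvN, hd]
    simp only [solveAltGo, ih]
    rw [hnl, hnd]
    have hnu : (if solveCU c then some i else pvN solveCU cs (i + 1)) = pvN solveCU (c :: cs) i := rfl
    rw [hnu, matchAns]
    refine congrArg _ (congrArg _ (congrArg _ ?_))
    simp [pvS]

lemma ifAns (n i : Nat) (U QU L QL D QD : List Nat) (t : Int) :
    (if U.length < (U ++ QU).length ∧ L.length < (L ++ QL).length ∧ D.length < (D ++ QD).length then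
      let jt := max ((U ++ QU).getD U.length 0)
        (max ((L ++ QL).getD L.length 0) ((D ++ QD).getD D.length 0))
      let sj := max jt (i + 5)
      if sj < n then t + ((n : Int) - (sj : Int)) else t
    else t) = t + pvContrib n i QU.head? QL.head? QD.head? := by
  rcases QU with _ | ⟨a, QU⟩ <;> rcases QL with _ | ⟨b, QL⟩ <;> rcases QD with _ | ⟨e, QD⟩ <;>
    simp [pvContrib]
  split <;> simp

lemma solveLoop_eq (l : List Char) (pre cs : List Char) (u lo d : Nat) (ans : Int)
    (hl : l = pre ++ cs)
    (hu : u ≤ (pvF solveCU pre 0).length)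
    (hlo : lo ≤ (pvF solveCL pre 0).length)
    (hd : d ≤ (pvF solveCD pre 0).length) :
    (solveLoop (pvF solveCU l 0) (pvF solveCL l 0) (pvF solveCD l 0) l.length
        (List.range' pre.length cs.length) (u, lo, d, ans)).2.2.2
      = ans + pvS l.length cs pre.length := by
  induction cs generalizing pre u lo d ans with
  | nil => simp [solveLoop, pvS]
  | cons c cs ih =>
    have hsplit : ∀ p : Char → Bool,
        pvF p l 0 = pvF p pre 0 ++ pvF p (c :: cs) pre.length := by
      intro p; rw [hl, pvF_append]; simp
    have hadv : ∀ (p : Char → Bool) (v : Nat), v ≤ (pvF p pre 0).length →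
        solveAdv (pvF p l 0) v pre.length = (pvF p pre 0).length := by
      intro p v hv
      rw [hsplit p]
      refine solveAdv_eq _ _ _ _ (fun x hx => ?_) (fun x hx => ?_) hv
      · have := pvF_mem_bounds p pre 0 x hx
        omega
      · exact (pvF_mem_bounds p (c :: cs) pre.length x hx).1
    simp only [List.length_cons, List.range'_succ, solveLoop]
    rw [hadv _ _ hu, hadv _ _ hlo, hadv _ _ hd]
    have hg : ∀ p : Char → Bool, pvF p l 0 = pvF p pre 0 ++ pvF p (c :: cs) pre.length :=
      hsplit
    rw [hg solveCU, hg solveCL, hg solveCD, ifAns]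
    have hlen : ∀ p : Char → Bool,
        (pvF p pre 0).length ≤ (pvF p (pre ++ [c]) 0).length := by
      intro p; rw [pvF_append]; simp
    have := ih (pre ++ [c]) ((pvF solveCU pre 0).length) ((pvF solveCL pre 0).length)
      ((pvF solveCD pre 0).length)
      (ans + pvContrib l.length pre.length (pvF solveCU (c :: cs) pre.length).head?
        (pvF solveCL (c :: cs) pre.length).head? (pvF solveCD (c :: cs) pre.length).head?)
      (by rw [hl]; simp) (hlen _) (hlen _) (hlen _)
    rw [hg solveCU, hg solveCL, hg solveCD] at this
    simp only [List.length_append, List.length_singleton] at this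
    rw [this]
    simp only [pvS, pvN_eq_head]
    ring

-- ===== VERDICT (by name: the statement is the Claim_ definition above) =====
theorem solve_spec : Claim_equal_solve := by
  unfold Claim_equal_solve
  intro s _
  unfold Spec_solve solve solve_alt
  simp only [solvePrep_eq, solveAltGo_eq]
  have h := solveLoop_eq s.toList [] s.toList 0 0 0 0 (by simp) (by simp [pvF])
    (by simp [pvF]) (by simp [pvF])
  simp only [List.length_nil] at h
  rw [List.range_eq_range', h]
  simp
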